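-- pv_equiv track=rewrite | github.com/bharath13211/Pikachu | pikachu.py | move_B_right
-- ===== SOURCE A (Python) =====
-- import copy
--
-- def move_B_right(board, player, N, r, c):
--     temp_board = copy.deepcopy(board)
--     if r < N and r >= 0 and c < N and c >= 2 and temp_board[r][c] == 'B':
--         for j in range(1, c):
--             if (temp_board[r][j] == 'w' or temp_board[r][j] == 'W') and temp_board[r][j - 1] == '.':
--                 list = []
--                 for k in range(j, c):
--                     if temp_board[r][k] == 'b' or temp_board[r][k] == 'B':
--                         list.append('N')
--                     elif temp_board[r][k] == '.':
--                         list.append('Y')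
--                 if 'N' not in list:
--                     temp_board[r][j - 1] = 'B'
--                     temp_board[r][j] = '.'
--                     temp_board[r][c] = '.'
--     return temp_board
-- ===== SOURCE B (Python) =====
-- def move_B_right(board, player, N, r, c):
--     temp_board = [list(row) for row in board]
--     if 0 <= r < N and 2 <= c < N and temp_board[r][c] == 'B':
--         row0 = board[r]
--         # one pass: last_bad = largest index k in [1, c) with a 'b'/'B', 0 if none
--         last_bad = 0
--         for k in range(1, c):
--             if row0[k] == 'b' or row0[k] == 'B':
--                 last_bad = k
--         row = temp_board[r]
--         for j in range(1, c):
--             if (row[j] == 'w' or row[j] == 'W') and row[j - 1] == '.' and last_bad < j: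
--                 row[j - 1] = 'B'
--                 row[j] = '.'
--                 row[c] = '.'
--     return temp_board
-- ===== Notes on version B (the rewrite author's own statement) =====
-- stated objective: faster
-- what changed: B replaces A's O(c) inner rescan per column (building a 'N'/'Y' list over temp_board[j:c]) by one precomputed pass over the original row that finds the last index in [1,c) holding 'b'/'B'; the per-column capture test becomes the O(1) comparison last_bad < j, while the outer loop still reads the live mutated row to preserve cascades.
import Mathlib
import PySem

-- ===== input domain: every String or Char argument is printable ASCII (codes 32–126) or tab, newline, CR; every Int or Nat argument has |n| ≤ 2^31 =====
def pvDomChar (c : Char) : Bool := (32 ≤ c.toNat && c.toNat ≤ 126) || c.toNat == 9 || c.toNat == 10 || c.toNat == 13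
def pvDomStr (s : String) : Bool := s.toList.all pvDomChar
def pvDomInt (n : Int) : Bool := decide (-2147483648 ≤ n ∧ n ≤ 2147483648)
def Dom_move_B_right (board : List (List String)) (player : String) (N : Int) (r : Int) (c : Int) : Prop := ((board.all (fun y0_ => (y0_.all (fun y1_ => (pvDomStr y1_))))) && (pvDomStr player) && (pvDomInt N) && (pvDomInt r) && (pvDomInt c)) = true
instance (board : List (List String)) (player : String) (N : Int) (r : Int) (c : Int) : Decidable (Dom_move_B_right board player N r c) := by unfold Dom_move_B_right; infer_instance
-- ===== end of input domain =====

-- B precomputes the last 'b'/'B' index of the original row once, turning A's inner rescan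
-- per column into one comparison (same return value; A mutates only its own deepcopy).

-- ===== PORT A =====
-- inner loop body: list.append('N'/'Y') per cell of the scan range
def pvA_innerStep (row : List String) (l : List String) (k : Int) : List String :=
  if row.getD k.toNat "" == "b" || row.getD k.toNat "" == "B" then l ++ ["N"]
  else if row.getD k.toNat "" == "." then l ++ ["Y"]
  else l

-- the list built by 'for k in range(j, c)'
def pvA_inner (row : List String) (j c : Int) : List String :=
  (PySem.List.pyRange j c 1).foldl (pvA_innerStep row) []

-- one iteration of 'for j in range(1, c)' acting on the whole temp_board
def pvA_step (rn : Nat) (c : Int) (tb : List (List String)) (j : Int) : List (List String) :=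
  if ((tb.getD rn []).getD j.toNat "" == "w" || (tb.getD rn []).getD j.toNat "" == "W") &&
     (tb.getD rn []).getD (j-1).toNat "" == "." then
    if (pvA_inner (tb.getD rn []) j c).contains "N" then tb
    else tb.set rn ((((tb.getD rn []).set (j-1).toNat "B").set j.toNat ".").set c.toNat ".")
  else tb

def move_B_right (board : List (List String)) (player : String) (N : Int) (r : Int) (c : Int) : List (List String) :=
  let temp_board := board
  if (decide (r < N) && decide (0 ≤ r) && decide (c < N) && decide (2 ≤ c) &&
      ((temp_board.getD r.toNat []).getD c.toNat "" == "B")) then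
    (PySem.List.pyRange 1 c 1).foldl (pvA_step r.toNat c) temp_board
  else temp_board

-- ===== PORT B =====
-- one iteration of the single pass computing last_bad over the ORIGINAL row
def pvB_lastStep (row0 : List String) (m : Int) (k : Int) : Int :=
  if row0.getD k.toNat "" == "b" || row0.getD k.toNat "" == "B" then k else m

-- one iteration of 'for j in range(1, c)' acting on the (live, mutated) row
def pvB_step (c lastBad : Int) (row : List String) (j : Int) : List String :=
  if (row.getD j.toNat "" == "w" || row.getD j.toNat "" == "W") && row.getD (j-1).toNat "" == "." &&
     decide (lastBad < j) then
    ((row.set (j-1).toNat "B").set j.toNat ".").set c.toNat "."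
  else row

def move_B_right_alt (board : List (List String)) (player : String) (N : Int) (r : Int) (c : Int) : List (List String) :=
  let temp_board := board
  if (decide (0 ≤ r) && decide (r < N) && decide (2 ≤ c) && decide (c < N) &&
      ((temp_board.getD r.toNat []).getD c.toNat "" == "B")) then
    let row0 := board.getD r.toNat []
    let lastBad := (PySem.List.pyRange 1 c 1).foldl (pvB_lastStep row0) 0
    temp_board.set r.toNat
      ((PySem.List.pyRange 1 c 1).foldl (pvB_step c lastBad) (temp_board.getD r.toNat []))
  else temp_board

-- ===== PRECONDITION & SPEC =====
-- Pre_ excludes exactly the inputs where A raises IndexError: the guard's integer tests pass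
-- but (r, c) is outside the board's extent, so 'temp_board[r][c]' raises.
def Pre_move_B_right (board : List (List String)) (player : String) (N : Int) (r : Int) (c : Int) : Prop :=
  (r < N ∧ 0 ≤ r ∧ c < N ∧ 2 ≤ c) → (r.toNat < board.length ∧ c.toNat < (board.getD r.toNat []).length)
instance (board : List (List String)) (player : String) (N : Int) (r : Int) (c : Int) : Decidable (Pre_move_B_right board player N r c) := by unfold Pre_move_B_right; infer_instance

def pvWitness_move_B_right : List (List String) × String × Int × Int × Int := ([[".", "w", "B"]], "w", 3, 0, 2)

def Spec_move_B_right (board : List (List String)) (player : String) (N : Int) (r : Int) (c : Int) (out : List (List String)) : Prop := out = move_B_right_alt board player N r c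
instance (board : List (List String)) (player : String) (N : Int) (r : Int) (c : Int) (out : List (List String)) : Decidable (Spec_move_B_right board player N r c out) := by unfold Spec_move_B_right; infer_instance

-- ===== CLAIM (what is proved, stated in full; the proofs are below) =====
def Claim_equal_move_B_right : Prop := ∀ (board : List (List String)) (player : String) (N : Int) (r : Int) (c : Int), Dom_move_B_right board player N r c → Pre_move_B_right board player N r c → Spec_move_B_right board player N r c (move_B_right board player N r c)

-- ===== LEMMAS AND PROOFS =====

-- row-level rephrasing of pvA_step (proof device: A's loop only ever touches row rn)
def pvA_rowStep (c : Int) (row : List String) (j : Int) : List String :=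
  if (row.getD j.toNat "" == "w" || row.getD j.toNat "" == "W") && row.getD (j-1).toNat "" == "." then
    if (pvA_inner row j c).contains "N" then row
    else ((row.set (j-1).toNat "B").set j.toNat ".").set c.toNat "."
  else row

lemma pvLA (rn : Nat) (c : Int) (js : List Int) (tb : List (List String)) (h : rn < tb.length) :
    js.foldl (pvA_step rn c) tb = tb.set rn (js.foldl (pvA_rowStep c) (tb.getD rn [])) := by
  induction js generalizing tb with
  | nil =>
      simp only [List.foldl_nil]
      rw [List.getD_eq_getElem _ _ h, List.set_getElem_self]
  | cons j js ih =>
      have hset : tb.set rn (tb.getD rn []) = tb := by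
        rw [List.getD_eq_getElem _ _ h, List.set_getElem_self]
      have hstep : pvA_step rn c tb j = tb.set rn (pvA_rowStep c (tb.getD rn []) j) := by
        unfold pvA_step pvA_rowStep
        by_cases h1 : (((tb.getD rn []).getD j.toNat "" == "w" || (tb.getD rn []).getD j.toNat "" == "W") &&
            (tb.getD rn []).getD (j-1).toNat "" == ".") = true
        · rw [if_pos h1, if_pos h1]
          by_cases h2 : (pvA_inner (tb.getD rn []) j c).contains "N" = true
          · rw [if_pos h2, if_pos h2, hset]
          · rw [if_neg h2, if_neg h2]
        · rw [if_neg h1, if_neg h1, hset]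
      have hlen : rn < (pvA_step rn c tb j).length := by
        rw [hstep]; simpa using h
      rw [List.foldl_cons, ih _ hlen, hstep, List.foldl_cons]
      have hg : (tb.set rn (pvA_rowStep c (tb.getD rn []) j)).getD rn [] =
          pvA_rowStep c (tb.getD rn []) j := by
        rw [List.getD_eq_getElem _ _ (by simpa using h)]
        simp
      rw [hg, List.set_set]

lemma pvInnerAux (row : List String) (ks : List Int) (l : List String) :
    ((ks.foldl (pvA_innerStep row) l).contains "N" = true) ↔
      (l.contains "N" = true ∨ ∃ k ∈ ks, (row.getD k.toNat "" == "b" || row.getD k.toNat "" == "B") = true) := by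
  induction ks generalizing l with
  | nil => simp
  | cons k ks ih =>
      rw [List.foldl_cons, ih]
      have hstep : ((pvA_innerStep row l k).contains "N" = true) ↔
          (l.contains "N" = true ∨ (row.getD k.toNat "" == "b" || row.getD k.toNat "" == "B") = true) := by
        unfold pvA_innerStep
        split
        · simp_all
        · split <;> simp_all
      rw [hstep]
      constructor
      · rintro (⟨h | h⟩ | ⟨k', hk', hb⟩)
        · exact Or.inl h
        · exact Or.inr ⟨k, by simp, h⟩
        · exact Or.inr ⟨k', by simp [hk'], hb⟩
      · rintro (h | ⟨k', hk', hb⟩)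
        · exact Or.inl (Or.inl h)
        · rcases List.mem_cons.mp hk' with rfl | hk'
          · exact Or.inl (Or.inr hb)
          · exact Or.inr ⟨k', hk', hb⟩

lemma pvInnerContains (row : List String) (j c : Int) :
    ((pvA_inner row j c).contains "N" = true) ↔
      ∃ k : Int, j ≤ k ∧ k < c ∧ (row.getD k.toNat "" == "b" || row.getD k.toNat "" == "B") = true := by
  unfold pvA_inner
  rw [pvInnerAux]
  simp only [List.contains_nil, Bool.false_eq_true, false_or, PySem.List.mem_pyRange_one]
  constructor
  · rintro ⟨k, ⟨h1, h2⟩, hb⟩; exact ⟨k, h1, h2, hb⟩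
  · rintro ⟨k, h1, h2, hb⟩; exact ⟨k, ⟨h1, h2⟩, hb⟩

-- the fold computing last_bad returns its init or a 'bad' element of the traversed list
lemma pvRes (row0 : List String) (ks : List Int) (m0 : Int) :
    ks.foldl (pvB_lastStep row0) m0 = m0 ∨
      ∃ k ∈ ks, (row0.getD k.toNat "" == "b" || row0.getD k.toNat "" == "B") = true ∧
        ks.foldl (pvB_lastStep row0) m0 = k := by
  induction ks generalizing m0 with
  | nil => simp
  | cons k ks ih =>
      rw [List.foldl_cons]
      by_cases hb : (row0.getD k.toNat "" == "b" || row0.getD k.toNat "" == "B") = true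
      · have hs : pvB_lastStep row0 m0 k = k := by unfold pvB_lastStep; rw [if_pos hb]
        rw [hs]
        rcases ih k with h | ⟨k', hk', hb', he⟩
        · exact Or.inr ⟨k, by simp, hb, h⟩
        · exact Or.inr ⟨k', by simp [hk'], hb', he⟩
      · have hs : pvB_lastStep row0 m0 k = m0 := by unfold pvB_lastStep; rw [if_neg hb]
        rw [hs]
        rcases ih m0 with h | ⟨k', hk', hb', he⟩
        · exact Or.inl h
        · exact Or.inr ⟨k', by simp [hk'], hb', he⟩

-- every bad index in [i, c) is ≤ the fold's result
lemma pvMax (row0 : List String) (c : Int) :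
    ∀ (n : Nat) (i m0 k : Int), (c - i).toNat = n → i ≤ k → k < c →
      (row0.getD k.toNat "" == "b" || row0.getD k.toNat "" == "B") = true →
      k ≤ (PySem.List.pyRange i c 1).foldl (pvB_lastStep row0) m0 := by
  intro n
  induction n with
  | zero => intro i m0 k hn h1 h2 _; omega
  | succ n ih =>
      intro i m0 k hn h1 h2 hb
      have hic : i < c := by omega
      rw [PySem.List.pyRange_one_cons hic, List.foldl_cons]
      rcases eq_or_lt_of_le h1 with rfl | hlt
      · -- k = i : the step sets the accumulator to i; the result is i or an element ≥ i+1
        have hstep : pvB_lastStep row0 m0 i = i := by unfold pvB_lastStep; rw [if_pos hb]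
        rw [hstep]
        rcases pvRes row0 (PySem.List.pyRange (i+1) c 1) i with h | ⟨k', hk', _, he⟩
        · omega
        · rw [he]
          have := (PySem.List.mem_pyRange_one.mp hk').1
          omega
      · exact ih (i+1) _ k (by omega) (by omega) h2 hb

-- characterization: j ≤ last_bad ↔ some bad index lies in [j, c)   (for 1 ≤ j)
lemma pvLastBadIff (row0 : List String) (c j : Int) (hj : 1 ≤ j) :
    (j ≤ (PySem.List.pyRange 1 c 1).foldl (pvB_lastStep row0) 0) ↔
      ∃ k : Int, j ≤ k ∧ k < c ∧ (row0.getD k.toNat "" == "b" || row0.getD k.toNat "" == "B") = true := by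
  constructor
  · intro h
    rcases pvRes row0 (PySem.List.pyRange 1 c 1) 0 with he | ⟨k, hk, hb, he⟩
    · omega
    · have hm := PySem.List.mem_pyRange_one.mp hk
      exact ⟨k, by omega, hm.2, hb⟩
  · rintro ⟨k, h1, h2, hb⟩
    have := pvMax row0 c (c - 1).toNat 1 0 k rfl (by omega) h2 hb
    omega

-- loop equivalence on the row, with the invariant that the scan range [i, c) is untouched
lemma pvLB (R : List String) (c : Int) :
    ∀ (n : Nat) (i : Int) (row : List String), (c - i).toNat = n → 1 ≤ i →
      (∀ k : Int, i ≤ k → k < c → row.getD k.toNat "" = R.getD k.toNat "") →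
      (PySem.List.pyRange i c 1).foldl (pvA_rowStep c) row =
        (PySem.List.pyRange i c 1).foldl (pvB_step c ((PySem.List.pyRange 1 c 1).foldl (pvB_lastStep R) 0)) row := by
  intro n
  induction n with
  | zero =>
      intro i row hn _ _
      rw [PySem.List.pyRange_one_eq_nil (by omega)]
      rfl
  | succ n ih =>
      intro i row hn hi hinv
      have hic : i < c := by omega
      rw [PySem.List.pyRange_one_cons hic, List.foldl_cons, List.foldl_cons]
      set lastBad := (PySem.List.pyRange 1 c 1).foldl (pvB_lastStep R) 0 with hLB
      -- the two capture tests agree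
      have hscan : ((pvA_inner row i c).contains "N" = true) ↔ (i ≤ lastBad) := by
        rw [pvInnerContains, pvLastBadIff R c i hi]
        constructor
        · rintro ⟨k, h1, h2, hb⟩; exact ⟨k, h1, h2, by rwa [← hinv k h1 h2]⟩
        · rintro ⟨k, h1, h2, hb⟩; exact ⟨k, h1, h2, by rwa [hinv k h1 h2]⟩
      have hstep : pvA_rowStep c row i = pvB_step c lastBad row i := by
        unfold pvA_rowStep pvB_step
        by_cases hw : ((row.getD i.toNat "" == "w" || row.getD i.toNat "" == "W") &&
            row.getD (i-1).toNat "" == ".") = true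
        · rw [if_pos hw]
          by_cases hN : (pvA_inner row i c).contains "N" = true
          · have hle : i ≤ lastBad := hscan.mp hN
            rw [if_pos hN, if_neg (by
              intro hcontra
              have h2 := ((Bool.and_eq_true _ _).mp hcontra).2
              simp only [decide_eq_true_eq] at h2
              omega)]
          · have hlt : lastBad < i := by
              by_contra hle
              exact hN (hscan.mpr (by omega))
            rw [if_neg hN, if_pos (by
              rw [Bool.and_eq_true]
              exact ⟨hw, by simpa using hlt⟩)]
        · rw [if_neg hw, if_neg (fun hc => hw ((Bool.and_eq_true _ _).mp hc).1)]
      rw [hstep]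
      apply ih (i+1) _ (by omega) (by omega)
      intro k hk1 hk2
      unfold pvB_step
      split
      · rw [List.getD_eq_getElem?_getD,
            List.getElem?_set_ne (show c.toNat ≠ k.toNat by omega),
            List.getElem?_set_ne (show i.toNat ≠ k.toNat by omega),
            List.getElem?_set_ne (show (i-1).toNat ≠ k.toNat by omega),
            ← List.getD_eq_getElem?_getD]
        exact hinv k (by omega) hk2
      · exact hinv k (by omega) hk2

-- ===== VERDICT (by name: the statement is the Claim_ definition above) =====
theorem move_B_right_spec : Claim_equal_move_B_right := by
  intro board player N r c _ hpre
  unfold Spec_move_B_right move_B_right move_B_right_alt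
  by_cases hg : (r < N ∧ 0 ≤ r ∧ c < N ∧ 2 ≤ c ∧ (board.getD r.toNat []).getD c.toNat "" = "B")
  · obtain ⟨h1, h2, h3, h4, h5⟩ := hg
    obtain ⟨hr, hc⟩ := hpre ⟨h1, h2, h3, h4⟩
    rw [if_pos (by simp [h1, h2, h3, h4]; simpa [List.getD_eq_getElem?_getD] using h5),
        if_pos (by simp [h1, h2, h3, h4]; simpa [List.getD_eq_getElem?_getD] using h5)]
    rw [pvLA r.toNat c _ board hr]
    congr 1
    exact pvLB (board.getD r.toNat []) c (c - 1).toNat 1 (board.getD r.toNat []) rfl le_rfl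
      (fun _ _ _ => rfl)
  · rw [if_neg (by simp only [Bool.and_eq_true, decide_eq_true_eq, beq_iff_eq,
          List.getD_eq_getElem?_getD] at *; tauto),
        if_neg (by simp only [Bool.and_eq_true, decide_eq_true_eq, beq_iff_eq,
          List.getD_eq_getElem?_getD] at *; tauto)]
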